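-- pv_equiv track=rewrite | github.com/seansio1995/codefights | lineup.py | lineUp
-- ===== SOURCE A (Python) =====
-- def lineUp(commands):
--     pair=True
--     res=0
--     for c in commands:
--         if c=="L" or c=="R":
--             pair=not pair
--             if pair:
--                 res+=1
--         else:
--             if pair:
--                 res+=1
--     return res
-- ===== SOURCE B (Python) =====
-- def lineUp(commands):
--     # prefix-parity formulation: a soldier faces the commander after position i
--     # iff the number of turn commands ("L"/"R") through i is even
--     contrib = [1 if c == "L" or c == "R" else 0 for c in commands]
--     prefix = []
--     total = 0
--     for t in contrib:
--         total += t
--         prefix.append(total)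
--     return sum(1 for s in prefix if s % 2 == 0)
-- ===== Notes on version B (the rewrite author's own statement) =====
-- stated objective: alternative
-- what changed: B first materializes the 0/1 turn-contribution list and its running prefix sums, then counts the positions whose cumulative turn count is even, instead of A's interleaved boolean toggle with conditional increments.
import Mathlib
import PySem

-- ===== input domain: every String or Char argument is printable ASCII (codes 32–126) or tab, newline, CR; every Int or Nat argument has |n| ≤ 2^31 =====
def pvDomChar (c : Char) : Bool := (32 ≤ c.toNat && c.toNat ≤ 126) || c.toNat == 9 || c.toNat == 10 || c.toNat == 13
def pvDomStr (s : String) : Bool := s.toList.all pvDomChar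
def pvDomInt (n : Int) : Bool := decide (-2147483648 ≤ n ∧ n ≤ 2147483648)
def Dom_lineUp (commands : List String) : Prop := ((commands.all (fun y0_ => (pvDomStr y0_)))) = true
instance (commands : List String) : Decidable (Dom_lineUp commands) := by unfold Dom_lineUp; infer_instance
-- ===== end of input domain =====

-- B replaces A's interleaved toggle-and-count loop by materializing the prefix sums of
-- 0/1 turn contributions and counting the positions with even cumulative sum (alternative decomposition).


-- ===== PORT A =====
def lineUp (commands : List String) : Int :=
  (commands.foldl
    (fun (st : Bool × Int) c =>
      if c = "L" ∨ c = "R" then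
        let pair := !st.1
        (pair, if pair then st.2 + 1 else st.2)
      else
        (st.1, if st.1 then st.2 + 1 else st.2))
    (true, 0)).2

-- ===== PORT B =====
def lineUp_alt (commands : List String) : Int :=
  let contrib := commands.map (fun c => if c = "L" ∨ c = "R" then (1 : Int) else 0)
  let pref := (contrib.foldl
    (fun (st : Int × List Int) t => (st.1 + t, st.2 ++ [st.1 + t]))
    ((0 : Int), ([] : List Int))).2
  ((pref.filter (fun s => s % 2 == 0)).length : Int)

-- ===== PRECONDITION & SPEC =====
def Spec_lineUp (commands : List String) (out : Int) : Prop := out = lineUp_alt commands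
instance (commands : List String) (out : Int) : Decidable (Spec_lineUp commands out) := by unfold Spec_lineUp; infer_instance

-- ===== CLAIM (what is proved, stated in full; the proofs are below) =====
def Claim_equal_lineUp : Prop := ∀ (commands : List String), Dom_lineUp commands → Spec_lineUp commands (lineUp commands)

-- ===== LEMMAS AND PROOFS =====

-- the prefix-sum list B builds, as a structural recursion
def pvPrefList (t : Int) : List Int → List Int
  | [] => []
  | x :: xs => (t + x) :: pvPrefList (t + x) xs

lemma pvFoldB_snd (xs : List Int) : ∀ (t : Int) (acc : List Int),
    (xs.foldl (fun (st : Int × List Int) t => (st.1 + t, st.2 ++ [st.1 + t])) (t, acc)).2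
      = acc ++ pvPrefList t xs := by
  induction xs with
  | nil => intro t acc; simp [pvPrefList]
  | cons x xs ih =>
      intro t acc
      simp only [List.foldl, pvPrefList]
      rw [ih]
      simp

lemma pvParityFlip (t : Int) : ((t + 1) % 2 == 0) = !(t % 2 == 0) := by
  by_cases h : t % 2 = 0
  · have h1 : (t + 1) % 2 ≠ 0 := by omega
    simp [h, h1]
  · have h1 : (t + 1) % 2 = 0 := by omega
    simp [h, h1]

lemma pvMain (cs : List String) : ∀ (p : Bool) (r t : Int), (t % 2 == 0) = p →
    (cs.foldl
      (fun (st : Bool × Int) c =>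
        if c = "L" ∨ c = "R" then
          let pair := !st.1
          (pair, if pair then st.2 + 1 else st.2)
        else
          (st.1, if st.1 then st.2 + 1 else st.2))
      (p, r)).2
    = r + (((pvPrefList t (cs.map (fun c => if c = "L" ∨ c = "R" then (1 : Int) else 0))).filter
        (fun s => s % 2 == 0)).length : Int) := by
  induction cs with
  | nil => intro p r t h; simp [pvPrefList]
  | cons c cs ih =>
      intro p r t h
      by_cases hc : c = "L" ∨ c = "R"
      · simp only [List.foldl, List.map, pvPrefList, if_pos hc, List.filter]
        have hflip : ((t + 1) % 2 == 0) = !p := by rw [pvParityFlip, h]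
        rw [ih (!p) _ (t + 1) hflip, hflip]
        cases p <;> simp <;> ring
      · simp only [List.foldl, List.map, pvPrefList, if_neg hc, List.filter]
        have h0 : ((t + 0) % 2 == 0) = p := by rw [add_zero, h]
        rw [ih p _ (t + 0) h0, h0]
        cases p <;> simp <;> ring

-- ===== VERDICT (by name: the statement is the Claim_ definition above) =====
theorem lineUp_spec : Claim_equal_lineUp := by
  intro commands _
  show lineUp commands = lineUp_alt commands
  unfold lineUp lineUp_alt
  simp only [pvFoldB_snd, List.nil_append]
  rw [pvMain commands true 0 0 (by decide)]
  simp
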